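-- pv_equiv track=rewrite | github.com/bramboereboom/MSc-thesis | HWP model/lrx.py | full_factorial
-- ===== SOURCE A (Python) =====
-- def full_factorial(shorthand):
--     if len(shorthand) == 0:
--         return {'': []}
--     ff = full_factorial(shorthand[:-1])
--     sh = shorthand[-1].split('|')
--     col_code = sh[0]
--     col_names = [n.strip() for n in sh[1].split(',')]
--     options = list(sh[2])
--     ffx = {}
--     for k in ff.keys():
--         for o in options:
--             ffx[k + col_code + o] = ff[k] + [cn + o for cn in col_names]
--     return ffx
-- ===== SOURCE B (Python) =====
-- def full_factorial(shorthand):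
--     result = {'': []}
--     for col in shorthand:
--         parts = col.split('|')
--         code = parts[0]
--         names = [n.strip() for n in parts[1].split(',')]
--         result = {k + code + o: v + [n + o for n in names]
--                   for k, v in result.items() for o in parts[2]}
--     return result
-- ===== Notes on version B (the rewrite author's own statement) =====
-- stated objective: simpler
-- what changed: Replaced the recursion on shorthand[:-1] plus explicit nested insertion loops with a single left-to-right loop that rebuilds the dict with one comprehension per column; Pre_ excludes only column strings with fewer than two '|' separators, on which both A and B raise IndexError.
import Mathlib
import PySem

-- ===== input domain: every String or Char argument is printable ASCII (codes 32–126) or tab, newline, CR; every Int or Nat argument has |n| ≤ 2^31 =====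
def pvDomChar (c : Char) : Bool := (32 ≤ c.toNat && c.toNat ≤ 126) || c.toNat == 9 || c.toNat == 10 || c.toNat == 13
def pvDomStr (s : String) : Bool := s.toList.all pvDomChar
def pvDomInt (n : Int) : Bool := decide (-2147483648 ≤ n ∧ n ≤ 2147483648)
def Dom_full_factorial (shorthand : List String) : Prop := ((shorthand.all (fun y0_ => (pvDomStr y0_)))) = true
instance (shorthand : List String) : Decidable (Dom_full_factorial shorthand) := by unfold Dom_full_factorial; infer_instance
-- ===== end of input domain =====

-- B replaces A's recursion on shorthand[:-1] (with explicit nested insert loops) by a single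
-- left-to-right pass rebuilding the dict with one comprehension per column: same cost, simpler.

-- ===== PORT A =====
-- A builds and returns a Python dict; the dict lives in ffA, full_factorial returns its items.
-- The '.getD' defaults on parts[1]/parts[2] are guarded by Pre_full_factorial (Python raises there);
-- the '.getD ""' on shorthand[-1] and parts[0] are guarded by the length test / split's nonempty result.
def ffA (shorthand : List String) : PySem.Dict String (List String) :=
  if _h : shorthand.length == 0 then PySem.Dict.empty.insert "" []
  else
    let ff := ffA (PySem.List.slice shorthand none (some (-1)))
    let sh := (PySem.Str.split? ((PySem.List.pyGet? shorthand (-1)).getD "") "|").getD []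
    let col_code := (PySem.List.pyGet? sh 0).getD ""
    let col_names := ((PySem.Str.split? ((PySem.List.pyGet? sh 1).getD "") ",").getD []).map PySem.Str.strip
    let options := ((PySem.List.pyGet? sh 2).getD "").toList
    ff.keys.foldl (fun ffx k =>
      options.foldl (fun ffx o =>
        ffx.insert (k ++ col_code ++ String.singleton o)
          (ff.getD k [] ++ col_names.map (fun cn => cn ++ String.singleton o))) ffx)
      PySem.Dict.empty
termination_by shorthand.length
decreasing_by
  simp only [PySem.List.slice_to_neg_one, List.length_dropLast]
  simp only [beq_iff_eq] at _h
  omega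

def full_factorial (shorthand : List String) : List (String × List String) :=
  (ffA shorthand).items

-- ===== PORT B =====
def full_factorial_alt (shorthand : List String) : List (String × List String) :=
  (shorthand.foldl (fun result col =>
      let parts := (PySem.Str.split? col "|").getD []
      let code := (PySem.List.pyGet? parts 0).getD ""
      let names := ((PySem.Str.split? ((PySem.List.pyGet? parts 1).getD "") ",").getD []).map PySem.Str.strip
      PySem.Dict.ofList (result.items.flatMap (fun kv =>
        ((PySem.List.pyGet? parts 2).getD "").toList.map (fun o =>
          (kv.1 ++ code ++ String.singleton o,
           kv.2 ++ names.map (fun n => n ++ String.singleton o))))))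
    (PySem.Dict.ofList [("", [])])).items

-- ===== PRECONDITION & SPEC =====
-- Pre_ excludes exactly the inputs where some column string splits into fewer than 3 '|'-parts,
-- on which the Python A raises IndexError at sh[1] or sh[2].
def Pre_full_factorial (shorthand : List String) : Prop :=
  ∀ s ∈ shorthand, 3 ≤ ((PySem.Str.split? s "|").getD []).length
instance (shorthand : List String) : Decidable (Pre_full_factorial shorthand) := by
  unfold Pre_full_factorial; infer_instance

def pvWitness_full_factorial : List String := ["a|x, y|12", "b|z|3"]

def Spec_full_factorial (shorthand : List String) (out : List (String × List String)) : Prop := out = full_factorial_alt shorthand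
instance (shorthand : List String) (out : List (String × List String)) : Decidable (Spec_full_factorial shorthand out) := by unfold Spec_full_factorial; infer_instance

-- ===== CLAIM (what is proved, stated in full; the proofs are below) =====
def Claim_equal_full_factorial : Prop := ∀ (shorthand : List String), Dom_full_factorial shorthand → Pre_full_factorial shorthand → Spec_full_factorial shorthand (full_factorial shorthand)

-- ===== LEMMAS AND PROOFS =====

-- B's per-column step, named for the proofs (definitionally what full_factorial_alt folds).
def stepB (result : PySem.Dict String (List String)) (col : String) : PySem.Dict String (List String) :=
  let parts := (PySem.Str.split? col "|").getD []
  let code := (PySem.List.pyGet? parts 0).getD ""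
  let names := ((PySem.Str.split? ((PySem.List.pyGet? parts 1).getD "") ",").getD []).map PySem.Str.strip
  PySem.Dict.ofList (result.items.flatMap (fun kv =>
    ((PySem.List.pyGet? parts 2).getD "").toList.map (fun o =>
      (kv.1 ++ code ++ String.singleton o,
       kv.2 ++ names.map (fun n => n ++ String.singleton o)))))

lemma alt_eq_foldl (shorthand : List String) :
    full_factorial_alt shorthand
      = (shorthand.foldl stepB (PySem.Dict.ofList [("", [])])).items := rfl

lemma nodup_stepB (d : PySem.Dict String (List String)) (col : String) :
    (stepB d col).keys.Nodup := PySem.Dict.nodup_keys_ofList _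

lemma nodup_foldB (shorthand : List String) :
    (shorthand.foldl stepB (PySem.Dict.ofList [("", [])])).keys.Nodup := by
  induction shorthand using List.reverseRecOn with
  | nil => exact PySem.Dict.nodup_keys_ofList _
  | append_singleton xs x _ => rw [List.foldl_append]; exact nodup_stepB _ _

-- A's per-column body equals B's per-column step on any dict with distinct keys.
lemma stepA_eq_stepB (ff : PySem.Dict String (List String)) (hnd : ff.keys.Nodup) (col : String) :
    (let sh := (PySem.Str.split? col "|").getD []
     let col_code := (PySem.List.pyGet? sh 0).getD ""
     let col_names := ((PySem.Str.split? ((PySem.List.pyGet? sh 1).getD "") ",").getD []).map PySem.Str.strip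
     let options := ((PySem.List.pyGet? sh 2).getD "").toList
     ff.keys.foldl (fun ffx k =>
       options.foldl (fun ffx o =>
         ffx.insert (k ++ col_code ++ String.singleton o)
           (ff.getD k [] ++ col_names.map (fun cn => cn ++ String.singleton o))) ffx)
       PySem.Dict.empty)
    = stepB ff col := by
  simp only [stepB, PySem.Dict.ofList, PySem.Dict.update, List.foldl_flatMap, List.foldl_map]
  rw [PySem.Dict.items_eq_map_keys ff hnd [], List.foldl_map]

lemma ffA_eq_foldB (shorthand : List String) :
    ffA shorthand = shorthand.foldl stepB (PySem.Dict.ofList [("", [])]) := by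
  induction shorthand using List.reverseRecOn with
  | nil => rw [ffA.eq_def]; rfl
  | append_singleton xs x ih =>
      rw [ffA.eq_def]
      rw [dif_neg (by simp)]
      have hsl : PySem.List.slice (xs ++ [x]) none (some (-1)) = xs := by
        rw [PySem.List.slice_to_neg_one]; simp
      have hget : (PySem.List.pyGet? (xs ++ [x]) (-1)).getD "" = x := by
        simp [PySem.List.pyGet?, PySem.List.pyIdx?]
      rw [List.foldl_append, List.foldl_cons, List.foldl_nil, hsl, ih, hget,
          ← stepA_eq_stepB _ (nodup_foldB xs) x]

-- ===== VERDICT (by name: the statement is the Claim_ definition above) =====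
theorem full_factorial_spec : Claim_equal_full_factorial := by
  intro shorthand _ _
  unfold Spec_full_factorial full_factorial
  rw [ffA_eq_foldB, alt_eq_foldl]
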